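-- pv_equiv track=rewrite | github.com/nelsenW/CodeWars | Python/7kyu/The old switcheroo.py | vowel_2_index
-- ===== SOURCE A (Python) =====
-- def vowel_2_index(string):
--     s = ''
--     for idx, char in enumerate(string):
--         if char in "aeiouAEIOU":
--             s += f'{idx + 1}'
--         else:
--             s += char
--     return s
-- ===== SOURCE B (Python) =====
-- def vowel_2_index(string):
--     # Staged algorithm: mark every vowel with a NUL sentinel via str.translate,
--     # split into the vowel-free segments, then rejoin the segments with the
--     # 1-based vowel positions recovered from the cumulative segment lengths.
--     table = str.maketrans(dict.fromkeys("aeiouAEIOU", "\x00"))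
--     segs = string.translate(table).split("\x00")
--     pieces = [segs[0]]
--     pos = len(segs[0])
--     for seg in segs[1:]:
--         pos += 1
--         pieces.append(str(pos))
--         pieces.append(seg)
--         pos += len(seg)
--     return "".join(pieces)
-- ===== Notes on version B (the rewrite author's own statement) =====
-- stated objective: alternative
-- what changed: Replaces the per-character enumerate loop with accumulator by a staged pipeline: translate vowels to a sentinel, split into vowel-free segments, and rejoin the segments with vowel positions recovered from cumulative segment lengths (bulk C-level translate/split/join instead of per-char Python branching).
import Mathlib
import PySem

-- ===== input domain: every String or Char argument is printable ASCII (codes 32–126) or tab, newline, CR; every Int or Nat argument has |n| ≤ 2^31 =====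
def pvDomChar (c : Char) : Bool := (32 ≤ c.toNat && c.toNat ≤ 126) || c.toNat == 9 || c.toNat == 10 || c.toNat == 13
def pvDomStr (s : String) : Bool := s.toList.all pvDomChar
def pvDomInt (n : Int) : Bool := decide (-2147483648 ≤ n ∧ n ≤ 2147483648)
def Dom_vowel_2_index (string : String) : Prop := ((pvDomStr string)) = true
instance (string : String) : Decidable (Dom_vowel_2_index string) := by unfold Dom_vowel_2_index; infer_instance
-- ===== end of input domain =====

-- B replaces A's per-character enumerate loop by a staged pipeline (translate vowels to a
-- sentinel, split into vowel-free segments, rejoin with positions from cumulative lengths);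
-- equivalence of return values on all domain strings (printable ASCII has no NUL sentinel).


-- ===== PORT A =====
-- char in "aeiouAEIOU"
def pvIsVowel (c : Char) : Bool := c ∈ "aeiouAEIOU".toList

def vowel_2_index (string : String) : String :=
  String.ofList <|
    (PySem.List.enumerate string.toList).foldl
      (fun s p =>
        if pvIsVowel p.2 then s ++ (PySem.Int.toStr (p.1 + 1)).toList
        else s ++ [p.2])
      []

-- ===== PORT B =====
-- string.translate(table): each vowel becomes the NUL sentinel
def pvTranslate (l : List Char) : List Char :=
  l.map (fun c => if pvIsVowel c then Char.ofNat 0 else c)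

-- .split("\x00") on the translated char list (Python str.split with a separator)
def pvSplitNul : List Char → List (List Char)
  | [] => [[]]
  | c :: cs =>
    let r := pvSplitNul cs
    if c == Char.ofNat 0 then [] :: r
    else
      match r with
      | [] => [[c]]
      | s :: rest => (c :: s) :: rest

-- the for-loop over segs[1:]: emit str(pos) then the segment, tracking pos
def pvRejoin : List (List Char) → Int → List Char
  | [], _ => []
  | seg :: rest, pos =>
    (PySem.Int.toStr (pos + 1)).toList ++ seg ++ pvRejoin rest (pos + 1 + seg.length)

def vowel_2_index_alt (string : String) : String :=
  match pvSplitNul (pvTranslate string.toList) with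
  | [] => ""  -- unreachable: split always yields at least one segment
  | s0 :: rest => String.ofList (s0 ++ pvRejoin rest (s0.length : Int))

-- ===== PRECONDITION & SPEC =====
def Spec_vowel_2_index (string : String) (out : String) : Prop := out = vowel_2_index_alt string
instance (string : String) (out : String) : Decidable (Spec_vowel_2_index string out) := by unfold Spec_vowel_2_index; infer_instance

-- ===== CLAIM (what is proved, stated in full; the proofs are below) =====
def Claim_equal_vowel_2_index : Prop := ∀ (string : String), Dom_vowel_2_index string → Spec_vowel_2_index string (vowel_2_index string)

-- ===== LEMMAS AND PROOFS =====
-- proof-only intermediate: the per-character value of A's loop without the accumulator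
def pvScan : List Char → Int → List Char
  | [], _ => []
  | c :: cs, i =>
    if pvIsVowel c then (PySem.Int.toStr (i + 1)).toList ++ pvScan cs (i + 1)
    else c :: pvScan cs (i + 1)

lemma pvFold_eq_scan (l : List Char) (i : Int) (acc : List Char) :
    (PySem.List.enumerate l i).foldl
      (fun s p =>
        if pvIsVowel p.2 then s ++ (PySem.Int.toStr (p.1 + 1)).toList
        else s ++ [p.2]) acc
    = acc ++ pvScan l i := by
  induction l generalizing i acc with
  | nil => simp [PySem.List.enumerate_nil, pvScan]
  | cons c cs ih =>
    rw [PySem.List.enumerate_cons]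
    simp only [List.foldl_cons]
    rw [ih]
    by_cases h : pvIsVowel c <;> simp [h, pvScan]

lemma pvSplitNul_ne_nil (l : List Char) : pvSplitNul l ≠ [] := by
  cases l with
  | nil => simp [pvSplitNul]
  | cons c cs =>
    simp only [pvSplitNul]
    split
    · simp
    · cases pvSplitNul cs <;> simp

lemma pvScan_eq_rejoin (l : List Char) (i : Int)
    (hd : l.all pvDomChar = true) :
    pvScan l i
      = match pvSplitNul (pvTranslate l) with
        | [] => []
        | s0 :: rest => s0 ++ pvRejoin rest (i + s0.length) := by
  induction l generalizing i with
  | nil => simp [pvScan, pvTranslate, pvSplitNul, pvRejoin]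
  | cons c cs ih =>
    simp only [List.all_cons, Bool.and_eq_true] at hd
    by_cases h : pvIsVowel c
    · have : pvTranslate (c :: cs) = Char.ofNat 0 :: pvTranslate cs := by
        simp [pvTranslate, h]
      rw [this]
      simp only [pvSplitNul, beq_self_eq_true, if_pos]
      rw [pvScan, if_pos h, ih _ hd.2]
      cases hsp : pvSplitNul (pvTranslate cs) with
      | nil => exact absurd hsp (pvSplitNul_ne_nil _)
      | cons s0 rest =>
        simp only [pvRejoin]
        have : i + 1 + (s0.length : Int) = i + 1 + s0.length := rfl
        simp [add_assoc]
    · have hc0 : c ≠ Char.ofNat 0 := by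
        intro he
        rw [he] at hd
        simp [pvDomChar] at hd
      have : pvTranslate (c :: cs) = c :: pvTranslate cs := by
        simp [pvTranslate, h]
      rw [this]
      simp only [pvSplitNul]
      rw [if_neg (by simpa using hc0)]
      rw [pvScan, if_neg h, ih _ hd.2]
      cases hsp : pvSplitNul (pvTranslate cs) with
      | nil => exact absurd hsp (pvSplitNul_ne_nil _)
      | cons s0 rest =>
        simp only [List.cons_append, List.length_cons]
        congr 2
        push_cast
        ring_nf

-- ===== VERDICT (by name: the statement is the Claim_ definition above) =====
theorem vowel_2_index_spec : Claim_equal_vowel_2_index := by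
  intro s hdom
  unfold Spec_vowel_2_index vowel_2_index vowel_2_index_alt
  rw [pvFold_eq_scan, List.nil_append]
  have hd : s.toList.all pvDomChar = true := hdom
  rw [pvScan_eq_rejoin s.toList 0 hd]
  cases hsp : pvSplitNul (pvTranslate s.toList) with
  | nil => exact absurd hsp (pvSplitNul_ne_nil _)
  | cons s0 rest => simp
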